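-- pv_equiv track=rewrite | github.com/daniel-reich/turbo-robot | M47FDJLjfNoZ6k6gF_13.py | cup_swapping
-- ===== SOURCE A (Python) =====
-- def cup_swapping(swaps):
--   positions = ['A','B','C']
--   position_number = 1
--   for eachswap in swaps:
--     #position 1
--     if 'A' in eachswap and 'B' in eachswap and position_number == 1:
--       position_number = 0
--     elif 'C' in eachswap and 'B' in eachswap and position_number == 1:
--       position_number = 2
--     #position 2
--     elif 'B' in eachswap and 'C' in eachswap and position_number == 2:
--       position_number = 1
--     elif 'A' in eachswap and 'C' in eachswap and position_number == 2:
--       position_number = 0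
--     #position 0
--     elif 'B' in eachswap and 'A' in eachswap and position_number == 0:
--       position_number = 1
--     elif 'C' in eachswap and 'A' in eachswap and position_number == 0:
--       position_number = 2
--   return positions[position_number]
-- ===== SOURCE B (Python) =====
-- # Compose each swap's full position map (a 3-entry function table) instead of
-- # tracking a single position through a branch chain; apply the composite once at the end.
-- def _effect(s):
--     a, b, c = 'A' in s, 'B' in s, 'C' in s
--     return ((1 if b and a else 2 if c and a else 0),
--             (0 if a and b else 2 if c and b else 1),
--             (1 if b and c else 0 if a and c else 2))
--
-- def cup_swapping(swaps):
--     comp = (0, 1, 2)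
--     for s in swaps:
--         e = _effect(s)
--         comp = (e[comp[0]], e[comp[1]], e[comp[2]])
--     return 'ABC'[comp[1]]
-- ===== Notes on version B (the rewrite author's own statement) =====
-- stated objective: alternative
-- what changed: B converts each swap into a complete 3-entry position map and folds function-table composition over the swaps, applying the composite map to the start position once at the end, instead of A's per-swap branch chain that mutates a single tracked position.
import Mathlib
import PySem

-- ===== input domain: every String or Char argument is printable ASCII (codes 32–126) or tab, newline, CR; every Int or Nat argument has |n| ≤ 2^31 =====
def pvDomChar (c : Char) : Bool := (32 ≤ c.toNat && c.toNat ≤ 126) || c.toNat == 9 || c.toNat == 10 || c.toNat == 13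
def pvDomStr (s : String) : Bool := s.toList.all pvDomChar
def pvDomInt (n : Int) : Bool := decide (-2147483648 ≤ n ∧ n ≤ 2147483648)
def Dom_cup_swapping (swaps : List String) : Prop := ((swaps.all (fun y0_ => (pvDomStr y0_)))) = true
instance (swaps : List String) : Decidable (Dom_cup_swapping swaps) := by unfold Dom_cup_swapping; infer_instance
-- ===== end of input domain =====

-- B composes each swap's full 3-entry position map and applies the composite once, instead of A's per-swap branch chain on one tracked position (objective: alternative).

-- ===== PORT A =====
-- one iteration of A's for-loop: the 6-way elif chain updating position_number
def cupStepA (n : Int) (s : String) : Int :=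
  if PySem.Str.isIn "A" s && PySem.Str.isIn "B" s && n == 1 then 0
  else if PySem.Str.isIn "C" s && PySem.Str.isIn "B" s && n == 1 then 2
  else if PySem.Str.isIn "B" s && PySem.Str.isIn "C" s && n == 2 then 1
  else if PySem.Str.isIn "A" s && PySem.Str.isIn "C" s && n == 2 then 0
  else if PySem.Str.isIn "B" s && PySem.Str.isIn "A" s && n == 0 then 1
  else if PySem.Str.isIn "C" s && PySem.Str.isIn "A" s && n == 0 then 2
  else n

def cup_swapping (swaps : List String) : String :=
  let positions : List String := ["A", "B", "C"]
  let position_number : Int := swaps.foldl cupStepA 1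
  (PySem.List.pyGet? positions position_number).getD ""  -- always some: position_number stays in {0,1,2}

-- ===== PORT B =====
-- _effect(s): the swap's position map as a 3-entry table
def cupEffect (s : String) : Int × Int × Int :=
  let a := PySem.Str.isIn "A" s
  let b := PySem.Str.isIn "B" s
  let c := PySem.Str.isIn "C" s
  ((if b && a then 1 else if c && a then 2 else 0),
   (if a && b then 0 else if c && b then 2 else 1),
   (if b && c then 1 else if a && c then 0 else 2))

-- tuple indexing e[i] for i ∈ {0,1,2} (always in range in B)
def cupIdx3 (t : Int × Int × Int) (i : Int) : Int :=
  if i == 0 then t.1 else if i == 1 then t.2.1 else t.2.2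

-- loop body: comp = (e[comp[0]], e[comp[1]], e[comp[2]])
def cupCompose (comp : Int × Int × Int) (s : String) : Int × Int × Int :=
  let e := cupEffect s
  (cupIdx3 e comp.1, cupIdx3 e comp.2.1, cupIdx3 e comp.2.2)

def cup_swapping_alt (swaps : List String) : String :=
  let comp := swaps.foldl cupCompose (0, 1, 2)
  -- 'ABC'[comp[1]] : string indexing, always in range in B
  ((PySem.Str.pyGet? "ABC" (cupIdx3 comp 1)).map String.singleton).getD ""

-- ===== PRECONDITION & SPEC =====
def Spec_cup_swapping (swaps : List String) (out : String) : Prop := out = cup_swapping_alt swaps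
instance (swaps : List String) (out : String) : Decidable (Spec_cup_swapping swaps out) := by unfold Spec_cup_swapping; infer_instance

-- ===== CLAIM (what is proved, stated in full; the proofs are below) =====
def Claim_equal_cup_swapping : Prop := ∀ (swaps : List String), Dom_cup_swapping swaps → Spec_cup_swapping swaps (cup_swapping swaps)

-- ===== LEMMAS AND PROOFS =====

-- a value in {0,1,2}
def cupOk (n : Int) : Prop := n = 0 ∨ n = 1 ∨ n = 2

lemma cupStepA_ok (s : String) (n : Int) (h : cupOk n) : cupOk (cupStepA n s) := by
  rcases h with h | h | h <;> subst h <;> unfold cupStepA cupOk <;> split_ifs <;> simp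

-- indexing the effect table equals A's step, for positions in {0,1,2}
lemma cupIdx3_effect (s : String) (n : Int) (h : cupOk n) :
    cupIdx3 (cupEffect s) n = cupStepA n s := by
  rcases h with h | h | h <;> subst h <;>
    by_cases hA : PySem.Chars.isIn ['A'] s.toList = true <;>
    by_cases hB : PySem.Chars.isIn ['B'] s.toList = true <;>
    by_cases hC : PySem.Chars.isIn ['C'] s.toList = true <;>
    simp [cupIdx3, cupEffect, cupStepA, hA, hB, hC]

-- the composed table is the pointwise fold of A's step
lemma cupFold_comm (swaps : List String) (x y z : Int)
    (hx : cupOk x) (hy : cupOk y) (hz : cupOk z) :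
    swaps.foldl cupCompose (x, y, z) =
      (swaps.foldl cupStepA x, swaps.foldl cupStepA y, swaps.foldl cupStepA z) := by
  induction swaps generalizing x y z with
  | nil => rfl
  | cons s rest ih =>
      simp only [List.foldl_cons]
      have : cupCompose (x, y, z) s = (cupStepA x s, cupStepA y s, cupStepA z s) := by
        simp [cupCompose, cupIdx3_effect s _ hx, cupIdx3_effect s _ hy, cupIdx3_effect s _ hz]
      rw [this]
      exact ih _ _ _ (cupStepA_ok s x hx) (cupStepA_ok s y hy) (cupStepA_ok s z hz)

theorem cup_swapping_spec : Claim_equal_cup_swapping := by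
  intro swaps _
  show cup_swapping swaps = cup_swapping_alt swaps
  unfold cup_swapping cup_swapping_alt
  rw [cupFold_comm swaps 0 1 2 (by left; rfl) (by right; left; rfl) (by right; right; rfl)]
  have hok : cupOk (swaps.foldl cupStepA 1) :=
    List.foldlRecOn swaps cupStepA (motive := cupOk) (by right; left; rfl)
      (fun n h s _ => cupStepA_ok s n h)
  rcases hok with h | h | h <;>
    simp [h, cupIdx3, PySem.List.pyGet?, PySem.List.pyIdx?, PySem.Str.pyGet?,
      String.singleton]
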